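-- pv_equiv track=rewrite | github.com/lucaskrol990/Whatsapp-analyzer | Aggregated/Statistics_aggregated.py | remove_bot_messages
-- ===== SOURCE A (Python) =====
-- def remove_bot_messages(messages, names):
--     '''
--     Remove potential bot messages (not sent by a sender)
--     '''
--     idx_remove = []
--     for idx, message in enumerate(messages):
--         bot = True  # Assume that the message was sent by a bot (not one of the senders)
--         for name in names:
--             if message.find(name + ':') != -1:  # If we do find a name
--                 bot = False  # It is not a bot
--                 break  # We don't need to search further
--         if bot:
--             idx_remove.append(idx)
--
--     return [message for idx, message in enumerate(messages) if idx not in idx_remove]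
-- ===== SOURCE B (Python) =====
-- def remove_bot_messages(messages, names):
--     '''
--     Remove potential bot messages (not sent by a sender)
--     '''
--     return [m for m in messages
--             if any(m.find(name + ':') != -1 for name in names)]
-- ===== Notes on version B (the rewrite author's own statement) =====
-- stated objective: simpler
-- what changed: Replaces the two-pass scheme (collect indices of bot messages, then re-scan filtering by index membership) with a single list comprehension that keeps a message iff any name+':' occurs in it; no index structure is maintained.
import Mathlib
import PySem

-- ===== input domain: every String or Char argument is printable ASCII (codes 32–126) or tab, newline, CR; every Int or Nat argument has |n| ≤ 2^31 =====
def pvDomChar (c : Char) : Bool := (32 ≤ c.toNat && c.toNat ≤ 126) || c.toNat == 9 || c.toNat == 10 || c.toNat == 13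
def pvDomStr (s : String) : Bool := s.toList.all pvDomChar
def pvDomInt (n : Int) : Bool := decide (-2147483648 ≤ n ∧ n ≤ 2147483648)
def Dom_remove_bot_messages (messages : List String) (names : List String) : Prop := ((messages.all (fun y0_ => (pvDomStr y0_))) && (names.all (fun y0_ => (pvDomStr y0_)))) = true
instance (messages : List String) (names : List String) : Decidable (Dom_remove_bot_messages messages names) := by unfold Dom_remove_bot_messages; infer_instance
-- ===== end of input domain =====

-- B replaces A's two passes (collect indices of bot messages, then filter by index
-- membership) with one list comprehension keeping a message iff some name+':' occurs in it (simpler).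


-- ===== PORT A =====
-- inner 'for name in names: if message.find(name + ':') != -1: bot = False; break'
-- (string concatenation and str.find are done on the character lists, exactly as PySem defines them)
def botLoopA (message : List Char) : List String → Bool
  | [] => true
  | name :: rest =>
      if PySem.Chars.find message (name.toList ++ [':']) ≠ -1 then false
      else botLoopA message rest

def remove_bot_messages (messages : List String) (names : List String) : List String :=
  let idx_remove : List Int :=
    (PySem.List.enumerate messages 0).foldl
      (fun acc q => if botLoopA q.2.toList names then acc ++ [q.1] else acc) []
  ((PySem.List.enumerate messages 0).filter (fun q => !(decide (q.1 ∈ idx_remove)))).map (·.2)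

-- ===== PORT B =====
def remove_bot_messages_alt (messages : List String) (names : List String) : List String :=
  messages.filter (fun m =>
    names.any (fun name => PySem.Chars.find m.toList (name.toList ++ [':']) ≠ -1))

-- ===== PRECONDITION & SPEC =====
def Spec_remove_bot_messages (messages : List String) (names : List String) (out : List String) : Prop := out = remove_bot_messages_alt messages names
instance (messages : List String) (names : List String) (out : List String) : Decidable (Spec_remove_bot_messages messages names out) := by unfold Spec_remove_bot_messages; infer_instance

-- ===== CLAIM (what is proved, stated in full; the proofs are below) =====
def Claim_equal_remove_bot_messages : Prop := ∀ (messages : List String) (names : List String), Dom_remove_bot_messages messages names → Spec_remove_bot_messages messages names (remove_bot_messages messages names)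

-- ===== LEMMAS AND PROOFS =====

-- A's inner loop is the negation of B's 'any'
lemma botLoopA_eq (m : List Char) (names : List String) :
    botLoopA m names
      = !(names.any (fun name => PySem.Chars.find m (name.toList ++ [':']) ≠ -1)) := by
  induction names with
  | nil => simp [botLoopA]
  | cons name rest ih =>
      by_cases h : PySem.Chars.find m (name.toList ++ [':']) ≠ -1
      · simp [botLoopA, h]
      · have h' : PySem.Chars.find m (name.toList ++ [':']) = -1 := not_ne_iff.mp h
        simp [botLoopA, h', ih]

-- first components of enumerate are injective
lemma enumerate_fst_inj {α : Type} {msgs : List α} {s : Int} {p q : Int × α}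
    (hp : p ∈ PySem.List.enumerate msgs s) (hq : q ∈ PySem.List.enumerate msgs s)
    (h : p.1 = q.1) : p = q := by
  rw [PySem.List.mem_enumerate_iff] at hp hq
  obtain ⟨k, hk, rfl⟩ := hp
  obtain ⟨j, hj, rfl⟩ := hq
  have : k = j := by simpa using h
  subst this; rfl

-- membership of an index in the collected idx list is exactly that entry's test
lemma mem_idx_iff {α : Type} (msgs : List α) (s : Int) (bad : Int × α → Bool)
    {q : Int × α} (hq : q ∈ PySem.List.enumerate msgs s) :
    (q.1 ∈ ((PySem.List.enumerate msgs s).filter bad).map Prod.fst) ↔ bad q = true := by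
  constructor
  · rintro h
    simp only [List.mem_map, List.mem_filter] at h
    obtain ⟨r, ⟨hrE, hrb⟩, hr1⟩ := h
    have := enumerate_fst_inj hrE hq hr1
    subst this; exact hrb
  · intro h
    exact List.mem_map.2 ⟨q, List.mem_filter.2 ⟨hq, h⟩, rfl⟩

-- filtering enumerate on a property of the element, then projecting, is filtering the list
lemma filter_enumerate_snd {α : Type} (msgs : List α) (s : Int) (p : α → Bool) :
    ((PySem.List.enumerate msgs s).filter (fun q => p q.2)).map (·.2) = msgs.filter p := by
  induction msgs generalizing s with
  | nil => simp [PySem.List.enumerate_nil]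
  | cons x xs ih =>
      by_cases h : p x <;> simp [PySem.List.enumerate_cons, h, ih]

-- ===== VERDICT (by name: the statement is the Claim_ definition above) =====
theorem remove_bot_messages_spec : Claim_equal_remove_bot_messages := by
  intro messages names _
  show remove_bot_messages messages names = remove_bot_messages_alt messages names
  unfold remove_bot_messages remove_bot_messages_alt
  dsimp only
  simp only [PySem.List.foldl_append_if]
  simp only [List.nil_append]
  have hcong :
      (PySem.List.enumerate messages 0).filter
        (fun q => !(decide (q.1 ∈ ((PySem.List.enumerate messages 0).filter
            (fun q => botLoopA q.2.toList names)).map Prod.fst)))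
      = (PySem.List.enumerate messages 0).filter
          (fun q => names.any (fun name => PySem.Chars.find q.2.toList (name.toList ++ [':']) ≠ -1)) := by
    apply List.filter_congr
    intro q hq
    rw [Bool.eq_iff_iff]
    simp only [Bool.not_eq_eq_eq_not, Bool.not_true, decide_eq_false_iff_not]
    constructor
    · intro h
      have := (not_iff_not.2 (mem_idx_iff messages 0 (fun q => botLoopA q.2.toList names) hq)).1 h
      simpa [botLoopA_eq] using this
    · intro h
      apply (not_iff_not.2 (mem_idx_iff messages 0 (fun q => botLoopA q.2.toList names) hq)).2
      simpa [botLoopA_eq] using h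
  exact (congrArg (List.map (fun x : Int × String => x.2)) hcong).trans
    (filter_enumerate_snd messages 0
      (fun m => names.any (fun name => PySem.Chars.find m.toList (name.toList ++ [':']) ≠ -1)))
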